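-- pv_equiv track=rewrite | github.com/Mohit427/MaRS-Task-1 | medium_dose/q5_manipulator.py | generate_valid_configs
-- ===== SOURCE A (Python) =====
-- def generate_valid_configs(target, L1, L2, L3, D):
--     configs = []
--     for inner in range(min(L1, target) + 1):
--         for outer in range(min(L3, target) + 1):
--             if abs(inner - outer) > D:
--                 continue
--             middle = target - inner - outer
--             if 0 <= middle <= L2:
--                 configs.append((inner, middle, outer))
--     return configs
-- ===== SOURCE B (Python) =====
-- def generate_valid_configs(target, L1, L2, L3, D):
--     configs = []
--     for inner in range(min(L1, target) + 1):
--         lo = max(0, inner - D, target - inner - L2)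
--         hi = min(L3, target, inner + D, target - inner)
--         for outer in range(lo, hi + 1):
--             configs.append((inner, target - inner - outer, outer))
--     return configs
-- ===== Notes on version B (the rewrite author's own statement) =====
-- stated objective: alternative
-- what changed: Replaces the inner scan over all candidate outers with a direct computation of the contiguous valid outer interval (intersection of the |inner-outer|<=D band, the 0<=middle<=L2 band and the outer range), emitting configs without testing each candidate.
import Mathlib
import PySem

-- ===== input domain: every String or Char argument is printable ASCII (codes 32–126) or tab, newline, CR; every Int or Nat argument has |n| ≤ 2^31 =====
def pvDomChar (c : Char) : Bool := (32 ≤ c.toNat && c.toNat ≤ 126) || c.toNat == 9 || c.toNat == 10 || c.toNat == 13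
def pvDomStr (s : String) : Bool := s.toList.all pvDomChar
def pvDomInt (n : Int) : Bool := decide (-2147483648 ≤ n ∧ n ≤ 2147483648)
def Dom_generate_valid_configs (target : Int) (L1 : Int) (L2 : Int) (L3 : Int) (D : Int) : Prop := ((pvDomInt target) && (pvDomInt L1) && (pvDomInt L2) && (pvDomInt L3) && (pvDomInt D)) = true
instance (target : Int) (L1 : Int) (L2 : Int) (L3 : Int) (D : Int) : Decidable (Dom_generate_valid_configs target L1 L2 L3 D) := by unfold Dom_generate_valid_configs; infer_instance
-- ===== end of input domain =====

-- B computes, for each inner, the contiguous valid outer interval directly instead of testing every candidate outer.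

-- ===== PORT A =====
def generate_valid_configs (target : Int) (L1 : Int) (L2 : Int) (L3 : Int) (D : Int) : List (List Int) :=
  (PySem.List.pyRange 0 (min L1 target + 1) 1).foldl (fun configs inner =>
    (PySem.List.pyRange 0 (min L3 target + 1) 1).foldl (fun configs outer =>
      if |inner - outer| > D then configs
      else
        let middle := target - inner - outer
        if 0 ≤ middle ∧ middle ≤ L2 then configs ++ [[inner, middle, outer]]
        else configs) configs) []

-- ===== PORT B =====
def generate_valid_configs_alt (target : Int) (L1 : Int) (L2 : Int) (L3 : Int) (D : Int) : List (List Int) :=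
  (PySem.List.pyRange 0 (min L1 target + 1) 1).foldl (fun configs inner =>
    let lo := max 0 (max (inner - D) (target - inner - L2))
    let hi := min (min L3 target) (min (inner + D) (target - inner))
    (PySem.List.pyRange lo (hi + 1) 1).foldl (fun configs outer =>
      configs ++ [[inner, target - inner - outer, outer]]) configs) []

-- ===== PRECONDITION & SPEC =====
def Spec_generate_valid_configs (target : Int) (L1 : Int) (L2 : Int) (L3 : Int) (D : Int) (out : List (List Int)) : Prop := out = generate_valid_configs_alt target L1 L2 L3 D
instance (target : Int) (L1 : Int) (L2 : Int) (L3 : Int) (D : Int) (out : List (List Int)) : Decidable (Spec_generate_valid_configs target L1 L2 L3 D out) := by unfold Spec_generate_valid_configs; infer_instance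

-- ===== CLAIM (what is proved, stated in full; the proofs are below) =====
def Claim_equal_generate_valid_configs : Prop := ∀ (target : Int) (L1 : Int) (L2 : Int) (L3 : Int) (D : Int), Dom_generate_valid_configs target L1 L2 L3 D → Spec_generate_valid_configs target L1 L2 L3 D (generate_valid_configs target L1 L2 L3 D)

-- ===== LEMMAS AND PROOFS =====

-- filtering an integer range by an interval test is an intersected range
lemma filter_pyRange_interval_aux (n : Nat) : ∀ (a b c d : Int), (b - a).toNat = n →
    (PySem.List.pyRange a b 1).filter (fun x => decide (c ≤ x ∧ x ≤ d))
      = PySem.List.pyRange (max a c) (min b (d + 1)) 1 := by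
  induction n with
  | zero =>
    intro a b c d h
    have hba : b ≤ a := by omega
    rw [PySem.List.pyRange_one_eq_nil hba,
        PySem.List.pyRange_one_eq_nil (show min b (d + 1) ≤ max a c by omega)]
    simp
  | succ n ih =>
    intro a b c d h
    have hab : a < b := by omega
    rw [PySem.List.pyRange_one_cons hab, List.filter_cons,
        ih (a + 1) b c d (by omega)]
    by_cases hc : c ≤ a ∧ a ≤ d
    · simp only [hc, and_self, decide_true, if_true]
      have h1 : max a c = a := by omega
      have h2 : max (a + 1) c = a + 1 := by omega
      rw [h1, h2, PySem.List.pyRange_one_cons (show a < min b (d + 1) by omega)]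
    · simp only [decide_eq_true_eq, hc, if_false]
      rcases (show a < c ∨ d < a by omega) with hlt | hlt
      · have : max a c = max (a + 1) c := by omega
        rw [this]
      · rw [PySem.List.pyRange_one_eq_nil (show min b (d + 1) ≤ max (a + 1) c by omega),
            PySem.List.pyRange_one_eq_nil (show min b (d + 1) ≤ max a c by omega)]

lemma filter_pyRange_interval (a b c d : Int) :
    (PySem.List.pyRange a b 1).filter (fun x => decide (c ≤ x ∧ x ≤ d))
      = PySem.List.pyRange (max a c) (min b (d + 1)) 1 :=
  filter_pyRange_interval_aux (b - a).toNat a b c d rfl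

-- A's inner loop for a fixed `inner` emits exactly the contiguous interval B enumerates
lemma inner_loop_eq (target L2 L3 D inner : Int) (acc : List (List Int)) :
    (PySem.List.pyRange 0 (min L3 target + 1) 1).foldl (fun configs outer =>
      if |inner - outer| > D then configs
      else
        let middle := target - inner - outer
        if 0 ≤ middle ∧ middle ≤ L2 then configs ++ [[inner, middle, outer]]
        else configs) acc
    = (PySem.List.pyRange (max 0 (max (inner - D) (target - inner - L2)))
        (min (min L3 target) (min (inner + D) (target - inner)) + 1) 1).foldl
        (fun configs outer => configs ++ [[inner, target - inner - outer, outer]]) acc := by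
  have hbody : ∀ (cs : List (List Int)) (outer : Int),
      (if |inner - outer| > D then cs
       else
         let middle := target - inner - outer
         if 0 ≤ middle ∧ middle ≤ L2 then cs ++ [[inner, middle, outer]] else cs)
      = (if max (inner - D) (target - inner - L2) ≤ outer ∧
            outer ≤ min (inner + D) (target - inner)
         then cs ++ [[inner, target - inner - outer, outer]] else cs) := by
    intro cs outer
    have habs : |inner - outer| ≤ D ↔ inner - D ≤ outer ∧ outer ≤ inner + D := by
      rw [abs_le]; omega
    by_cases hP : max (inner - D) (target - inner - L2) ≤ outer ∧
        outer ≤ min (inner + D) (target - inner)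
    · rw [if_pos hP,
          if_neg (show ¬(|inner - outer| > D) by rw [gt_iff_lt, not_lt, habs]; omega)]
      show (if 0 ≤ target - inner - outer ∧ target - inner - outer ≤ L2 then _ else _) = _
      rw [if_pos (by omega)]
    · rw [if_neg hP]
      by_cases hD : |inner - outer| > D
      · rw [if_pos hD]
      · rw [if_neg hD]
        rw [gt_iff_lt, not_lt, habs] at hD
        show (if 0 ≤ target - inner - outer ∧ target - inner - outer ≤ L2 then _ else _) = _
        rw [if_neg (by omega)]
  have step1 : (PySem.List.pyRange 0 (min L3 target + 1) 1).foldl (fun configs outer =>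
      if |inner - outer| > D then configs
      else
        let middle := target - inner - outer
        if 0 ≤ middle ∧ middle ≤ L2 then configs ++ [[inner, middle, outer]]
        else configs) acc
    = (PySem.List.pyRange 0 (min L3 target + 1) 1).foldl (fun cs outer =>
        if max (inner - D) (target - inner - L2) ≤ outer ∧
           outer ≤ min (inner + D) (target - inner)
        then cs ++ [[inner, target - inner - outer, outer]] else cs) acc := by
    apply PySem.List.foldl_congr_mem
    intro cs x _
    exact hbody cs x
  rw [step1, PySem.List.foldl_append_ite, filter_pyRange_interval,
      PySem.List.foldl_append_singleton_eq_map]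
  have : min (min L3 target + 1) (min (inner + D) (target - inner) + 1)
       = min (min L3 target) (min (inner + D) (target - inner)) + 1 := by omega
  rw [this]

-- ===== VERDICT (by name: the statement is the Claim_ definition above) =====
theorem generate_valid_configs_spec : Claim_equal_generate_valid_configs := by
  intro target L1 L2 L3 D _
  unfold Spec_generate_valid_configs generate_valid_configs generate_valid_configs_alt
  apply PySem.List.foldl_congr_mem
  intro acc inner _
  exact inner_loop_eq target L2 L3 D inner acc
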